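-- pv_equiv track=rewrite | github.com/TUDgpl/Oriented_Spanners | generators/short_edge_extractor.py | extract_distances
-- ===== SOURCE A (Python) =====
-- def extract_distances(point_list):
--     p_new = [1]
--     current = 1
--     length = len(point_list)
--     for i in range(length-1):
--         dis = point_list[i+1]- point_list[i]
--         current += dis
--         p_new.append(current)
--     return p_new
-- ===== SOURCE B (Python) =====
-- def extract_distances(point_list):
--     return [1] + [1 + p - point_list[0] for p in point_list[1:]]
-- ===== Notes on version B (the rewrite author's own statement) =====
-- stated objective: simpler
-- what changed: The running accumulator over consecutive differences telescopes, so B computes each output directly as 1 plus the difference between the current element and the first element, in a single comprehension with no loop state.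
import Mathlib
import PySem

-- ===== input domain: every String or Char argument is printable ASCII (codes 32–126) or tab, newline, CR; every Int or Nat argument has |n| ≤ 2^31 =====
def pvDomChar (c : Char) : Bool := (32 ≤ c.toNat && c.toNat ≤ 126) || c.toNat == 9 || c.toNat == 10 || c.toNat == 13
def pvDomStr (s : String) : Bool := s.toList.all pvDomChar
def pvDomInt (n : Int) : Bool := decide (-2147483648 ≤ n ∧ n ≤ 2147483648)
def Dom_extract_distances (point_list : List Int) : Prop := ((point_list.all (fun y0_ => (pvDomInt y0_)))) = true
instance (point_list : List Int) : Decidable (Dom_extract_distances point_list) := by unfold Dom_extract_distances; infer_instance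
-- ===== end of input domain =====

-- B replaces A's running accumulator by the telescoped direct formula 1 + (current element minus first element) (objective: simpler).

-- ===== PORT A =====
-- indices i and i+1 always lie in range for i ∈ range(length-1), so pyGetD … 0 is exact here
def extract_distances (point_list : List Int) : List Int :=
  let length : Int := point_list.length
  let r := (PySem.List.pyRange 0 (length - 1) 1).foldl
    (fun (st : List Int × Int) (i : Int) =>
      let dis := PySem.List.pyGetD point_list (i + 1) 0 - PySem.List.pyGetD point_list i 0
      let current := st.2 + dis
      (st.1 ++ [current], current))
    ([1], 1)
  r.1

-- ===== PORT B =====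
-- point_list[0] is only evaluated when point_list[1:] is nonempty, so pyGetD … 0 is exact there
def extract_distances_alt (point_list : List Int) : List Int :=
  [1] ++ (PySem.List.slice point_list (some 1) none).map
    (fun p => 1 + p - PySem.List.pyGetD point_list 0 0)

-- ===== PRECONDITION & SPEC =====
def Spec_extract_distances (point_list : List Int) (out : List Int) : Prop := out = extract_distances_alt point_list
instance (point_list : List Int) (out : List Int) : Decidable (Spec_extract_distances point_list out) := by unfold Spec_extract_distances; infer_instance

-- ===== CLAIM (what is proved, stated in full; the proofs are below) =====
def Claim_equal_extract_distances : Prop := ∀ (point_list : List Int), Dom_extract_distances point_list → Spec_extract_distances point_list (extract_distances point_list)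

-- ===== LEMMAS AND PROOFS =====

-- A's fold over range(m), characterised by the telescoped invariant
lemma extract_distances_fold (x : Int) (rest : List Int) (m : Nat) (hm : m ≤ rest.length) :
    (PySem.List.pyRange 0 (m : Int) 1).foldl
      (fun (st : List Int × Int) (i : Int) =>
        let dis := PySem.List.pyGetD (x :: rest) (i + 1) 0 - PySem.List.pyGetD (x :: rest) i 0
        let current := st.2 + dis
        (st.1 ++ [current], current))
      ([1], 1)
    = (1 :: (List.range m).map (fun (k : Nat) => 1 + PySem.List.pyGetD rest (k : Int) 0 - x),
       1 + PySem.List.pyGetD (x :: rest) (m : Int) 0 - x) := by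
  induction m with
  | zero =>
      simp [PySem.List.pyRange_one_eq_nil (by omega : (0:Int) ≤ 0)]
  | succ m ih =>
      have h1 : ((m + 1 : Nat) : Int) = (m : Int) + 1 := by push_cast; ring
      rw [h1, PySem.List.pyRange_one_succ_right (by positivity), List.foldl_append,
          ih (by omega)]
      have hget : ∀ j : Nat, PySem.List.pyGetD (x :: rest) ((j : Int) + 1) 0
          = PySem.List.pyGetD rest (j : Int) 0 := by
        intro j
        have : ((j : Int) + 1) = ((j + 1 : Nat) : Int) := by push_cast; ring
        rw [this, PySem.List.pyGetD_natCast, PySem.List.pyGetD_natCast]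
        simp
      simp only [List.foldl_cons, List.foldl_nil, hget, List.range_succ, List.map_append,
        List.map_cons, List.map_nil, Prod.mk.injEq]
      refine ⟨?_, by ring⟩
      simp only [List.cons_append, List.cons.injEq, List.append_cancel_left_eq, true_and]
      refine ⟨by ring, trivial⟩

-- map over range with indexed access is map over the list
lemma map_range_getD (rest : List Int) (f : Int → Int) :
    (List.range rest.length).map (fun (k : Nat) => f (PySem.List.pyGetD rest (k : Int) 0))
      = rest.map f := by
  induction rest with
  | nil => simp
  | cons y ys ih =>
      rw [List.length_cons, List.range_succ_eq_map]
      simp only [List.map_cons, List.map_map, List.cons.injEq]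
      refine ⟨by simp, ?_⟩
      rw [← ih]
      apply List.map_congr_left
      intro k _
      simp only [Function.comp, Nat.succ_eq_add_one, PySem.List.pyGetD_natCast]
      simp [List.getD]

-- ===== VERDICT (by name: the statement is the Claim_ definition above) =====
theorem extract_distances_spec : Claim_equal_extract_distances := by
  intro pl _
  unfold Spec_extract_distances extract_distances extract_distances_alt
  cases pl with
  | nil =>
      simp [PySem.List.slice_from_one]
  | cons x rest =>
      have hlen : ((x :: rest).length : Int) - 1 = (rest.length : Int) := by
        simp
      show (List.foldl
          (fun (st : List Int × Int) (i : Int) =>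
            let dis := PySem.List.pyGetD (x :: rest) (i + 1) 0 - PySem.List.pyGetD (x :: rest) i 0
            let current := st.2 + dis
            (st.1 ++ [current], current))
          ([1], 1) (PySem.List.pyRange 0 (((x :: rest).length : Int) - 1) 1)).1
        = [1] ++ (PySem.List.slice (x :: rest) (some 1) none).map
            (fun p => 1 + p - PySem.List.pyGetD (x :: rest) 0 0)
      rw [hlen, extract_distances_fold x rest rest.length le_rfl]
      rw [PySem.List.slice_from_one]
      simp only [List.tail_cons, PySem.List.pyGetD_zero_cons]
      rw [map_range_getD rest (fun p => 1 + p - x)]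
      simp
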